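-- pv_equiv track=rewrite | github.com/HeNeos/CompetitiveProgramming | ProjectEuler/704.py | solve
-- ===== SOURCE A (Python) =====
-- N = 60
--
-- f = [0]*N
--
-- def find_sum(first_m, level):
--   if level == 1:
--     return first_m-1
--   amount_level = first_m//2
--   return find_sum(first_m - amount_level, level-1) + amount_level * level
--
-- def solve(n):
--   total_sum = 0
--   for i in range(1, N):
--     if n == 0:
--       break
--     length = (1<<i)
--     if n >= length:
--       total_sum += f[i]
--       n -= length
--     else:
--       total_sum += find_sum(n, i)
--       break
--
--   return total_sum
-- ===== SOURCE B (Python) =====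
-- def solve(n):
--     # iterative: climb full bit-levels, then accumulate find_sum as a loop
--     if n == 0:
--         return 0
--     level = 1
--     while level < 60 and n >= (1 << level):
--         n -= (1 << level)
--         if n == 0:
--             return 0
--         level += 1
--     if level == 60:
--         return 0
--     total = 0
--     m = n
--     while level > 1:
--         amount = m // 2
--         total += amount * level
--         m -= amount
--         level -= 1
--     return total + (m - 1)
-- ===== Notes on version B (the rewrite author's own statement) =====
-- stated objective: alternative
-- what changed: find_sum's non-tail recursion is replaced by an accumulator while-loop inlined into solve, and the outer for-with-break over bit-levels becomes an explicit while climb with early returns (dropping the dead f[i]=0 additions).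
import Mathlib
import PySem

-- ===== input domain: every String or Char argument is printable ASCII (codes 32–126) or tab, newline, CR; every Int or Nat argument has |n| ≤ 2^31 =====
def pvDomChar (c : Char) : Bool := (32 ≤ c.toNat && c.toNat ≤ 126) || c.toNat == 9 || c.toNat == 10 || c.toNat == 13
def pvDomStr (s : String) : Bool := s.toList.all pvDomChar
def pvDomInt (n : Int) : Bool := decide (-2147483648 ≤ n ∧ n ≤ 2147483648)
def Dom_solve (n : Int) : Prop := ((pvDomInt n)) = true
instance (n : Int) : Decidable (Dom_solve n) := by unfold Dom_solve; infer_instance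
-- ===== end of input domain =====

-- B replaces find_sum's recursion by an accumulator loop inlined into an explicit while-climb
-- over bit-levels with early returns (objective: alternative decomposition, same cost).

-- ===== PORT A =====
-- the module constant f = [0]*N (N = 60)
def fA : List Int := List.replicate 60 0

-- find_sum(first_m, level): literal recursion; Python diverges for level < 1 (never called so),
-- the final 'else 0' branch is only a totality guard for that divergent region.
def findSumA (first_m : Int) (level : Int) : Int :=
  if level = 1 then first_m - 1
  else if 1 < level then
    findSumA (first_m - PySem.Int.floordiv first_m 2) (level - 1)
      + (PySem.Int.floordiv first_m 2) * level
  else 0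
termination_by level.toNat
decreasing_by omega

-- the for i in range(1, N) loop with its break conditions; f[i] accessed as in Python
def solveLoopA (n : Int) (i : Nat) (total : Int) : Int :=
  if i ≥ 60 then total
  else if n = 0 then total
  else
    let length : Int := 2 ^ i
    if n ≥ length then
      solveLoopA (n - length) (i + 1) (total + (PySem.List.pyGet? fA (i : Int)).getD 0)
    else total + findSumA n (i : Int)
termination_by 60 - i

def solve (n : Int) : Int := solveLoopA n 1 0

-- ===== PORT B =====
-- the descending accumulator while-loop (while level > 1: ...; return total + (m-1))
def altDescend (m : Int) (level : Nat) (total : Int) : Int :=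
  if 1 < level then
    altDescend (m - PySem.Int.floordiv m 2) (level - 1)
      (total + (PySem.Int.floordiv m 2) * (level : Int))
  else total + (m - 1)

-- the climbing while-loop with its two early returns
def altClimb (n : Int) (level : Nat) : Int :=
  if h : level < 60 ∧ 2 ^ level ≤ n then
    if n - 2 ^ level = 0 then 0
    else altClimb (n - 2 ^ level) (level + 1)
  else if level = 60 then 0
  else altDescend n level 0
termination_by 60 - level
decreasing_by omega

def solve_alt (n : Int) : Int := if n = 0 then 0 else altClimb n 1

-- ===== PRECONDITION & SPEC =====
def Spec_solve (n : Int) (out : Int) : Prop := out = solve_alt n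
instance (n : Int) (out : Int) : Decidable (Spec_solve n out) := by unfold Spec_solve; infer_instance

-- ===== CLAIM (what is proved, stated in full; the proofs are below) =====
def Claim_equal_solve : Prop := ∀ (n : Int), Dom_solve n → Spec_solve n (solve n)

-- ===== LEMMAS AND PROOFS =====

-- the accumulator loop of B computes A's recursive find_sum
lemma altDescend_eq (level : Nat) : ∀ (m total : Int), 1 ≤ level →
    altDescend m level total = total + findSumA m (level : Int) := by
  induction level with
  | zero => omega
  | succ k ih =>
    intro m total _
    by_cases hk : 1 ≤ k
    · rw [altDescend, if_pos (by omega)]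
      have hc : ((k + 1 : Nat) : Int) - 1 = (k : Int) := by push_cast; ring
      have h2 : findSumA m ((k + 1 : Nat) : Int) =
          findSumA (m - PySem.Int.floordiv m 2) (k : Int)
            + (PySem.Int.floordiv m 2) * ((k + 1 : Nat) : Int) := by
        rw [findSumA, if_neg (by push_cast; omega), if_pos (by push_cast; omega), hc]
      rw [show k + 1 - 1 = k from rfl, ih _ _ hk, h2]
      ring
    · have hk0 : k = 0 := by omega
      subst hk0
      rw [altDescend, if_neg (by omega), findSumA, if_pos (by norm_num)]

-- f[i] is always 0
lemma fA_get (i : Nat) (h : i < 60) : (PySem.List.pyGet? fA (i : Int)).getD 0 = 0 := by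
  rw [PySem.List.pyGet?_natCast, show fA = List.replicate 60 (0 : Int) from rfl,
    List.getElem?_replicate]
  simp [h]

-- the two main loops agree (induction on the remaining fuel 60 - i)
lemma loops_eq (k : Nat) : ∀ (i : Nat) (n total : Int), i + k = 60 → 1 ≤ i → n ≠ 0 →
    solveLoopA n i total = total + altClimb n i := by
  induction k with
  | zero =>
    intro i n total h _ hn
    have hi : i = 60 := by omega
    subst hi
    rw [solveLoopA, if_pos (by omega), altClimb]
    simp
  | succ k ih =>
    intro i n total h hi hn
    have hlt : i < 60 := by omega
    rw [solveLoopA, if_neg (by omega), if_neg hn]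
    by_cases hge : (2 : Int) ^ i ≤ n
    · rw [altClimb, dif_pos ⟨hlt, hge⟩]
      by_cases hz : n - 2 ^ i = 0
      · rw [if_pos hz, if_pos hge, hz, solveLoopA, fA_get i hlt]
        by_cases h60 : i + 1 ≥ 60
        · rw [if_pos h60]
        · rw [if_neg h60, if_pos rfl]
      · rw [if_pos hge, if_neg hz, ih (i + 1) _ _ (by omega) (by omega) hz,
          fA_get i hlt]
        ring_nf
    · rw [if_neg (by omega), altClimb, dif_neg (by tauto), if_neg (by omega),
        altDescend_eq i n 0 hi]
      ring

-- ===== VERDICT (by name: the statement is the Claim_ definition above) =====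
theorem solve_spec : Claim_equal_solve := by
  intro n _
  unfold Spec_solve solve solve_alt
  by_cases hn : n = 0
  · subst hn; rw [solveLoopA]; norm_num
  · rw [if_neg hn, loops_eq 59 1 n 0 (by omega) (by omega) hn]; ring
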